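-- pv_equiv track=rewrite | github.com/owYuriGG/Python-Web-Scrapping | extract_module.py | get_game_name
-- ===== SOURCE A (Python) =====
-- def get_game_name(linhas, game, i):
--     gravar = False
--     qtd = 0
--     for j in linhas[i+2]:
--         if gravar:
--             if j == '<':
--                 gravar = False
--         if gravar and qtd < 2:
--             game['nome'] = game['nome'] + j
--
--         if not gravar:
--             if j == '>':
--                 gravar = True
--                 qtd += 1
--     return game
-- ===== SOURCE B (Python) =====
-- def get_game_name(linhas, game, i):
--     line = linhas[i + 2]
--     start = line.find('>')
--     if start == -1:
--         return game
--     end = line.find('<', start + 1)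
--     if end == -1:
--         end = len(line)
--     seg = line[start + 1:end]
--     if seg:
--         game['nome'] = game['nome'] + seg
--     return game
-- ===== Notes on version B (the rewrite author's own statement) =====
-- stated objective: simpler
-- what changed: Replaces the per-character gravar/qtd state-machine loop with two boundary searches (find '>' then find '<') and a single slice appended in one dict update.
import Mathlib
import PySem

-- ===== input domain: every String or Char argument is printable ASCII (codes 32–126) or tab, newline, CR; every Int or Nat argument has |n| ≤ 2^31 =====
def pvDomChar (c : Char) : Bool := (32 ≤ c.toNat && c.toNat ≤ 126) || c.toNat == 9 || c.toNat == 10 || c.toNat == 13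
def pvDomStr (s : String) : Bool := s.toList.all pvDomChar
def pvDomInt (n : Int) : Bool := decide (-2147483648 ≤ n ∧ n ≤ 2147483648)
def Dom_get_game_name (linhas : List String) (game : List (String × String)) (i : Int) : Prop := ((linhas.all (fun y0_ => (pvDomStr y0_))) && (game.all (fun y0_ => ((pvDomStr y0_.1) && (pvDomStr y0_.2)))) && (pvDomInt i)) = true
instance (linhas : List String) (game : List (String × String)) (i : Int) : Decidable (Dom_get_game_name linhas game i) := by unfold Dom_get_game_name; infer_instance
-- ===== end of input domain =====

-- B replaces A's per-character gravar/qtd state machine with two boundary searches (find '>' / find '<')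
-- and a single slice appended in one dict update (objective: simpler). Both mutate game in place in
-- Python; the equivalence proved here is about the returned value.

-- dict[k] = v / dict.get(k, d) on an insertion-ordered association list (shared dict primitives of both ports)
def pvDictGetD : List (String × String) → String → String → String
  | [], _, d => d
  | (k', v') :: t, k, d => if k' = k then v' else pvDictGetD t k d

def pvDictSet : List (String × String) → String → String → List (String × String)
  | [], k, v => [(k, v)]
  | (k', v') :: t, k, v => if k' = k then (k, v) :: t else (k', v') :: pvDictSet t k v

-- ===== PORT A =====
-- one iteration of A's for-loop; state = (game, gravar, qtd)
def pvStepA (st : List (String × String) × Bool × Int) (j : Char) : List (String × String) × Bool × Int :=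
  let gravar1 := if st.2.1 then (if j = '<' then false else st.2.1) else st.2.1
  let game1 := if gravar1 ∧ st.2.2 < 2 then pvDictSet st.1 "nome" (pvDictGetD st.1 "nome" "" ++ j.toString) else st.1
  let gq := if ¬ gravar1 then (if j = '>' then (true, st.2.2 + 1) else (gravar1, st.2.2)) else (gravar1, st.2.2)
  (game1, gq)

def get_game_name (linhas : List String) (game : List (String × String)) (i : Int) : List (String × String) :=
  let line := (PySem.List.pyGet? linhas (i + 2)).getD ""
  (line.toList.foldl pvStepA (game, false, 0)).1

-- ===== PORT B =====
def get_game_name_alt (linhas : List String) (game : List (String × String)) (i : Int) : List (String × String) :=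
  let line := (PySem.List.pyGet? linhas (i + 2)).getD ""
  let start := PySem.Str.find line ">"
  if start = -1 then game
  else
    let e0 := PySem.Str.findFrom line "<" (start + 1)
    let e := if e0 = -1 then PySem.Str.len line else e0
    let seg := PySem.Str.slice line (some (start + 1)) (some e)
    if seg = "" then game
    else pvDictSet game "nome" (pvDictGetD game "nome" "" ++ seg)

-- ===== PRECONDITION & SPEC =====
-- true iff the line has a '>' followed by at least one captured character, i.e. game['nome'] is accessed
def pvNeedsNome (cs : List Char) : Bool :=
  match cs.dropWhile (· != '>') with
  | [] => false
  | _ :: rest => rest.head?.getD '<' != '<'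

-- Pre_ excludes inputs where both Pythons raise (i+2 out of range → IndexError; a nonempty capture with
-- no 'nome' key → KeyError) and games whose association list has duplicate keys, which do not represent a
-- Python dict argument.
def Pre_get_game_name (linhas : List String) (game : List (String × String)) (i : Int) : Prop :=
  (PySem.List.pyGet? linhas (i + 2)).isSome = true ∧
  (game.map Prod.fst).Nodup ∧
  (pvNeedsNome ((PySem.List.pyGet? linhas (i + 2)).getD "").toList = true → "nome" ∈ game.map Prod.fst)

instance (linhas : List String) (game : List (String × String)) (i : Int) : Decidable (Pre_get_game_name linhas game i) := by unfold Pre_get_game_name; infer_instance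

def pvWitness_get_game_name : List String × (List (String × String)) × Int :=
  (["", "", "a>Nice<b"], [("nome", "X")], 0)

def Spec_get_game_name (linhas : List String) (game : List (String × String)) (i : Int) (out : List (String × String)) : Prop := out = get_game_name_alt linhas game i
instance (linhas : List String) (game : List (String × String)) (i : Int) (out : List (String × String)) : Decidable (Spec_get_game_name linhas game i out) := by unfold Spec_get_game_name; infer_instance

-- ===== CLAIM (what is proved, stated in full; the proofs are below) =====
def Claim_equal_get_game_name : Prop := ∀ (linhas : List String) (game : List (String × String)) (i : Int), Dom_get_game_name linhas game i → Pre_get_game_name linhas game i → Spec_get_game_name linhas game i (get_game_name linhas game i)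

-- ===== LEMMAS AND PROOFS =====

theorem pv_getD_set (g : List (String × String)) (k v d : String) :
    pvDictGetD (pvDictSet g k v) k d = v := by
  induction g with
  | nil => simp [pvDictSet, pvDictGetD]
  | cons h t ih =>
    obtain ⟨k', v'⟩ := h
    by_cases hk : k' = k <;> simp [pvDictSet, pvDictGetD, hk, ih]

theorem pv_set_set (g : List (String × String)) (k v v' : String) :
    pvDictSet (pvDictSet g k v) k v' = pvDictSet g k v' := by
  induction g with
  | nil => simp [pvDictSet]
  | cons h t ih =>
    obtain ⟨k0, v0⟩ := h
    by_cases hk : k0 = k <;> simp [pvDictSet, hk, ih]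

-- the game-component effect of appending each captured char in turn
def pvAppendChars (s : List Char) (g : List (String × String)) : List (String × String) :=
  s.foldl (fun g c => pvDictSet g "nome" (pvDictGetD g "nome" "" ++ c.toString)) g

theorem pvAppendChars_eq (s : List Char) (g : List (String × String)) :
    pvAppendChars s g =
      if s = [] then g else pvDictSet g "nome" (pvDictGetD g "nome" "" ++ String.ofList s) := by
  induction s generalizing g with
  | nil => simp [pvAppendChars]
  | cons c t ih =>
    have hstep : pvAppendChars (c :: t) g
        = pvAppendChars t (pvDictSet g "nome" (pvDictGetD g "nome" "" ++ c.toString)) := rfl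
    rw [hstep, ih]
    have hval : ∀ t' : List Char,
        (pvDictGetD g "nome" "" ++ c.toString) ++ String.ofList t'
          = pvDictGetD g "nome" "" ++ String.ofList (c :: t') := by
      intro t'; rw [← String.toList_inj]; simp
    by_cases ht : t = []
    · subst ht
      rw [if_pos rfl, if_neg (by simp : ¬ (c :: ([] : List Char)) = [])]
      have h0 : pvDictGetD g "nome" "" ++ c.toString
          = pvDictGetD g "nome" "" ++ String.ofList [c] := by
        rw [← String.toList_inj]; simp
      rw [h0]
    · rw [if_neg ht, if_neg (by simp : ¬ (c :: t) = []), pv_getD_set, pv_set_set, hval]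

-- once qtd has passed the capture window nothing is appended any more
theorem pv_dead (cs : List Char) (g : List (String × String)) (b : Bool) (q : Int)
    (h1 : b = true → 2 ≤ q) (h2 : 1 ≤ q) : (cs.foldl pvStepA (g, b, q)).1 = g := by
  induction cs generalizing b q with
  | nil => rfl
  | cons c t ih =>
    cases b with
    | false =>
      by_cases hc : c = '>'
      · subst hc
        simp only [List.foldl_cons, pvStepA]
        simp only [ite_false, ite_true, Bool.false_eq_true, if_neg (by simp : ¬ (False ∧ q < 2))]
        exact ih true (q + 1) (fun _ => by omega) (by omega)
      · simp only [List.foldl_cons, pvStepA]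
        simp [hc]
        exact ih false q (by simp) h2
    | true =>
      have hq2 : 2 ≤ q := h1 rfl
      by_cases hc : c = '<'
      · subst hc
        simp only [List.foldl_cons, pvStepA]
        simp [show ¬ (q < 2) by omega]
        exact ih false q (by simp) (by omega)
      · simp only [List.foldl_cons, pvStepA]
        simp [hc, show ¬ (q < 2) by omega]
        exact ih true q (fun _ => hq2) (by omega)

-- in the capture phase A appends exactly the chars before the next '<'
theorem pv_capture (post : List Char) (g : List (String × String)) :
    (post.foldl pvStepA (g, true, 1)).1 = pvAppendChars (post.takeWhile (· != '<')) g := by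
  induction post generalizing g with
  | nil => rfl
  | cons c t ih =>
    by_cases hc : c = '<'
    · subst hc
      simp only [List.foldl_cons, pvStepA]
      simp
      exact pv_dead t g false 1 (by simp) le_rfl
    · simp only [List.foldl_cons, pvStepA]
      simp [hc]
      rw [ih]
      simp [List.takeWhile_cons, hc, pvAppendChars]

-- characterization of A's whole loop
theorem pv_A_char (cs : List Char) (g : List (String × String)) :
    (cs.foldl pvStepA (g, false, 0)).1 =
      if '>' ∈ cs then
        pvAppendChars (((cs.dropWhile (· != '>')).drop 1).takeWhile (· != '<')) g
      else g := by
  induction cs generalizing g with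
  | nil => rfl
  | cons c t ih =>
    by_cases hc : c = '>'
    · subst hc
      simp only [List.foldl_cons, pvStepA]
      simp
      rw [pv_capture]
    · simp only [List.foldl_cons, pvStepA]
      simp [hc]
      rw [ih]
      simp [List.dropWhile_cons, hc, show ¬ ('>' = c) from fun e => hc e.symm]

-- first occurrence of a single char, dropWhile form
theorem pv_dropWhile_mem (a : Char) (cs : List Char) (h : a ∈ cs) :
    cs.dropWhile (· != a) = a :: (cs.dropWhile (· != a)).tail := by
  induction cs with
  | nil => cases h
  | cons c t ih =>
    by_cases hc : c = a
    · subst hc; simp [List.dropWhile_cons]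
    · have hb : (c != a) = true := by simpa using hc
      rw [List.dropWhile_cons, if_pos hb]
      apply ih
      rcases List.mem_cons.mp h with h' | h'
      · exact absurd h'.symm hc
      · exact h'

theorem pv_takeWhile_all (a : Char) (l : List Char) (h : a ∉ l) : l.takeWhile (· != a) = l := by
  induction l with
  | nil => rfl
  | cons c t ih =>
    have hc : c ≠ a := fun e => h (e ▸ List.mem_cons_self ..)
    have hb : (c != a) = true := by simpa using hc
    rw [List.takeWhile_cons, if_pos hb, ih (fun hm => h (List.mem_cons_of_mem _ hm))]

theorem pv_singleton_prefix (a : Char) (l : List Char) : [a] <+: l ↔ l.head? = some a := by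
  cases l with
  | nil => simp
  | cons b t => simp [List.cons_prefix_cons, eq_comm]

theorem pv_find_singleton (cs : List Char) (a : Char) :
    PySem.Chars.find cs [a] =
      if a ∈ cs then ((cs.takeWhile (· != a)).length : Int) else -1 := by
  by_cases hm : a ∈ cs
  · rw [if_pos hm]
    obtain ⟨s, t, hst⟩ := List.append_of_mem hm
    have hinf : [a] <:+: cs := ⟨s, t, by rw [hst]; simp⟩
    have hne := (PySem.Chars.find_ne_neg_one_iff cs [a]).mpr hinf
    have hle := PySem.Chars.neg_one_le_find cs [a]
    have h0 : 0 ≤ PySem.Chars.find cs [a] := by omega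
    obtain ⟨hpre, hmin⟩ := PySem.Chars.find_spec h0
    set n := (PySem.Chars.find cs [a]).toNat with hn
    set p := (cs.takeWhile (· != a)).length with hp
    have hdecomp : cs.takeWhile (· != a) ++ a :: (cs.dropWhile (· != a)).tail = cs := by
      conv_rhs => rw [← List.takeWhile_append_dropWhile (p := (· != a)) (l := cs)]
      congr 1
      exact (pv_dropWhile_mem a cs hm).symm
    have hsome : cs[n]? = some a := by
      rw [← List.head?_drop]
      exact (pv_singleton_prefix a _).mp hpre
    have hpsome : cs[p]? = some a := by
      rw [← hdecomp, List.getElem?_append_right (le_refl _)]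
      simp
    have hpmin : ∀ i, i < p → cs[i]? ≠ some a := by
      intro i hi hcon
      have : cs[i]? = (cs.takeWhile (· != a))[i]? := by
        conv_lhs => rw [← hdecomp]
        rw [List.getElem?_append_left hi]
      rw [this] at hcon
      have hmem : a ∈ cs.takeWhile (· != a) := List.mem_of_getElem? hcon
      have := List.mem_takeWhile_imp hmem
      simp at this
    have hnp : n = p := by
      rcases lt_trichotomy n p with h | h | h
      · exact absurd hsome (hpmin n h)
      · exact h
      · exfalso
        apply hmin p h
        rw [pv_singleton_prefix, List.head?_drop]
        exact hpsome
    omega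
  · rw [if_neg hm]
    by_contra hne
    have hinf := (PySem.Chars.find_ne_neg_one_iff cs [a]).mp hne
    exact hm (hinf.subset (List.mem_singleton_self a))

theorem pv_set_congr (g : List (String × String)) (k : String) {v w : String}
    (h : v.toList = w.toList) : pvDictSet g k v = pvDictSet g k w := by
  rw [String.toList_inj.mp h]

set_option maxHeartbeats 1000000 in
theorem pv_main (linhas : List String) (game : List (String × String)) (i : Int) :
    get_game_name linhas game i = get_game_name_alt linhas game i := by
  unfold get_game_name get_game_name_alt
  dsimp only
  rw [pv_A_char]
  set line := (PySem.List.pyGet? linhas (i + 2)).getD "" with hline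
  set cs := line.toList with hcs
  by_cases hm : '>' ∈ cs
  · have hfind : PySem.Str.find line ">" = ((cs.takeWhile (· != '>')).length : Int) := by
      rw [PySem.Str.find_eq, show (">" : String).toList = ['>'] from rfl, ← hcs,
        pv_find_singleton, if_pos hm]
    set p := (cs.takeWhile (· != '>')).length with hp
    set post := (cs.dropWhile (· != '>')).tail with hpost
    have hdecomp : cs.takeWhile (· != '>') ++ '>' :: post = cs := by
      conv_rhs => rw [← List.takeWhile_append_dropWhile (p := (· != '>')) (l := cs)]
      congr 1
      exact (pv_dropWhile_mem '>' cs hm).symm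
    have hlen : cs.length = p + 1 + post.length := by
      rw [← hdecomp]; simp [hp]; omega
    have hdrop : cs.drop (p + 1) = post := by
      conv_lhs => rw [← hdecomp]
      rw [show cs.takeWhile (· != '>') ++ '>' :: post
            = (cs.takeWhile (· != '>') ++ ['>']) ++ post by simp,
        show p + 1 = (cs.takeWhile (· != '>') ++ ['>']).length by simp [hp],
        List.drop_left]
    have hdseg : (cs.dropWhile (· != '>')).drop 1 = post := by
      rw [pv_dropWhile_mem '>' cs hm]; rfl
    rw [if_pos hm, hfind, if_neg (by omega : ¬ ((p : Int) = -1)), hdseg]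
    have hff : PySem.Str.findFrom line "<" ((p : Int) + 1) none
        = if PySem.Chars.find post ['<'] = -1 then -1
          else ((p : Nat) : Int) + 1 + PySem.Chars.find post ['<'] := by
      rw [PySem.Str.findFrom_eq, show ("<" : String).toList = ['<'] from rfl, ← hcs,
        show ((p : Int) + 1) = ((p + 1 : Nat) : Int) by push_cast; ring,
        PySem.Chars.findFrom_natCast cs ['<'] (p + 1) (by omega), hdrop]
    rw [hff]
    by_cases hlt : '<' ∈ post
    · set q := (post.takeWhile (· != '<')).length with hq
      have hfp : PySem.Chars.find post ['<'] = (q : Int) := by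
        rw [pv_find_singleton, if_pos hlt]
      rw [hfp, if_neg (by omega : ¬ ((q : Int) = -1)),
        if_neg (by omega : ¬ ((p : Nat) : Int) + 1 + (q : Int) = -1)]
      have hseg : (PySem.Str.slice line (some ((p : Int) + 1))
          (some (((p : Nat) : Int) + 1 + (q : Int)))).toList = post.takeWhile (· != '<') := by
        rw [PySem.Str.toList_slice, PySem.Chars.slice_eq_listSlice, ← hcs,
          show (((p : Nat) : Int) + 1 + (q : Int)) = ((p + 1 + q : Nat) : Int) by push_cast; ring,
          show ((p : Int) + 1) = ((p + 1 : Nat) : Int) by push_cast; ring,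
          PySem.List.slice_natCast, hdrop,
          show p + 1 + q - (p + 1) = q by omega]
        conv_lhs => rw [← List.takeWhile_append_dropWhile (p := (· != '<')) (l := post)]
        rw [show q = (post.takeWhile (· != '<')).length from hq, List.take_left]
      rw [pvAppendChars_eq]
      by_cases hnil : post.takeWhile (· != '<') = []
      · rw [if_pos hnil, if_pos (by rw [← String.toList_inj, hseg, hnil]; rfl)]
      · rw [if_neg hnil, if_neg (by rw [← String.toList_inj, hseg]; simpa using hnil)]
        exact pv_set_congr game "nome" (by simp [hseg])
    · have hfp : PySem.Chars.find post ['<'] = -1 := by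
        rw [pv_find_singleton, if_neg hlt]
      rw [hfp, if_pos rfl, if_pos rfl]
      have htw : post.takeWhile (· != '<') = post := pv_takeWhile_all '<' post hlt
      have hseg : (PySem.Str.slice line (some ((p : Int) + 1))
          (some (PySem.Str.len line))).toList = post := by
        rw [PySem.Str.toList_slice, PySem.Chars.slice_eq_listSlice, ← hcs,
          PySem.Str.len_eq, ← hcs,
          show ((p : Int) + 1) = ((p + 1 : Nat) : Int) by push_cast; ring,
          PySem.List.slice_natCast, hdrop,
          show cs.length - (p + 1) = post.length by omega, List.take_length]
      rw [pvAppendChars_eq, htw]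
      by_cases hnil : post = []
      · rw [if_pos hnil, if_pos (by rw [← String.toList_inj, hseg, hnil]; rfl)]
      · rw [if_neg hnil, if_neg (by rw [← String.toList_inj, hseg]; simpa using hnil)]
        exact pv_set_congr game "nome"
          (by rw [String.toList_append, String.toList_append, hseg]; simp)
  · have hfind : PySem.Str.find line ">" = -1 := by
      rw [PySem.Str.find_eq, show (">" : String).toList = ['>'] from rfl, ← hcs,
        pv_find_singleton, if_neg hm]
    rw [if_neg hm, hfind, if_pos rfl]

-- ===== VERDICT (by name: the statement is the Claim_ definition above) =====
theorem get_game_name_spec : Claim_equal_get_game_name := by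
  intro linhas game i _ _
  unfold Spec_get_game_name
  exact pv_main linhas game i
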